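-- pv_equiv track=rewrite | github.com/T-Srikanth/DSML | A13.py | gen_array
-- ===== SOURCE A (Python) =====
-- def gen_array(A):
--   n = len(A)
--   B = [0]*n
--   for i in range(n):
--     for j in range(7):
--       if (A[i]&(1<<j))==(1<<j):
--         B[i]=1<<j
--         break
--   return B
-- ===== SOURCE B (Python) =====
-- def gen_array(A):
--   return [(x & 0x7f) & -(x & 0x7f) for x in A]
-- ===== Notes on version B (the rewrite author's own statement) =====
-- stated objective: simpler
-- what changed: Replaces the nested loop over bit positions 0..6 (with break) by a closed-form bit trick per element: m = x & 0x7f, result m & -m, in a single comprehension.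
import Mathlib
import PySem

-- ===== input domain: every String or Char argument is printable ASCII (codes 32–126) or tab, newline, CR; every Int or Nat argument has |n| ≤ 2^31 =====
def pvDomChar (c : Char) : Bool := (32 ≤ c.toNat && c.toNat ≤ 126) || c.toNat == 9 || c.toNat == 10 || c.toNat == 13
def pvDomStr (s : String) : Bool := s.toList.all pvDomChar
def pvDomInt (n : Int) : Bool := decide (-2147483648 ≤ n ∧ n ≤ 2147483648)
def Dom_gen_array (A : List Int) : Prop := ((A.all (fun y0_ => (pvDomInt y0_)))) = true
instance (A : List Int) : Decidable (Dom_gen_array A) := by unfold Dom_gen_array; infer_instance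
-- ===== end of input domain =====

-- B replaces A's inner loop over bit positions 0..6 (with break) by the closed-form m & -m on m = x & 0x7f; objective: simpler.

-- ===== PORT A =====
-- inner loop 'for j in range(7): if (A[i] & (1<<j)) == (1<<j): B[i] = 1<<j; break'
def pvFirstBit (x : Int) : List Nat → Int
  | [] => 0
  | j :: js => if PySem.Int.band x ((1 : Int) <<< j) = (1 : Int) <<< j then (1 : Int) <<< j else pvFirstBit x js

def gen_array (A : List Int) : List Int := A.map (fun x => pvFirstBit x (List.range 7))

-- ===== PORT B =====
def gen_array_alt (A : List Int) : List Int :=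
  A.map (fun x => PySem.Int.band (PySem.Int.band x 127) (-(PySem.Int.band x 127)))

-- ===== PRECONDITION & SPEC =====
def Spec_gen_array (A : List Int) (out : List Int) : Prop := out = gen_array_alt A
instance (A : List Int) (out : List Int) : Decidable (Spec_gen_array A out) := by unfold Spec_gen_array; infer_instance

-- ===== CLAIM (what is proved, stated in full; the proofs are below) =====
def Claim_equal_gen_array : Prop := ∀ (A : List Int), Dom_gen_array A → Spec_gen_array A (gen_array A)

-- ===== LEMMAS AND PROOFS =====

-- bit j of n (j < 7) survives reduction mod 128
theorem pv_nat_and_pow_mod (n j : Nat) (h : j < 7) : n &&& 2 ^ j = (n % 128) &&& 2 ^ j := by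
  have h128 : (128 : Nat) = 2 ^ 7 := rfl
  apply Nat.eq_of_testBit_eq
  intro i
  rw [Nat.testBit_and, Nat.testBit_and, h128, Nat.testBit_mod_two_pow]
  by_cases hij : j = i
  · subst hij; simp [h]
  · have : (2 ^ j).testBit i = false := by simp [hij]
    simp [this]

-- flipping the low 7 bits: (127 - m).testBit j = ! m.testBit j for m < 128, j < 7
theorem pv_flip_bit : ∀ (p : Fin 128) (j : Fin 7), (127 - p.val).testBit j.val = ! p.val.testBit j.val := by decide

-- negative branch helper
theorem pv_nat_pow_sub_and (y j : Nat) (h : j < 7) :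
    2 ^ j - (2 ^ j &&& y) = (127 - y % 128) &&& 2 ^ j := by
  have hm : y % 128 < 128 := Nat.mod_lt _ (by norm_num)
  have h128 : (128 : Nat) = 2 ^ 7 := rfl
  have hb : y.testBit j = (y % 128).testBit j := by
    rw [h128, Nat.testBit_mod_two_pow]; simp [h]
  rw [Nat.two_pow_and, Nat.and_two_pow, hb,
    pv_flip_bit ⟨y % 128, hm⟩ ⟨j, h⟩]
  cases hc : (y % 128).testBit j <;> simp

-- band x 127 = x % 128 (Python-exact on negatives)
theorem pv_band127 (x : Int) : PySem.Int.band x 127 = x % 128 := by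
  unfold PySem.Int.band
  split_ifs with hx h7 h7
  · rw [show ((127 : Int)).toNat = 127 from rfl]
    have : x.toNat &&& 127 = x.toNat % 128 := by
      have := Nat.and_two_pow_sub_one_eq_mod (x.toNat) 7
      simpa using this
    rw [this]; omega
  · omega
  · -- x < 0; band x 127 = 127 - (127 &&& (-x-1).toNat)
    have y := (-x - 1).toNat
    have h127 : (127 : Nat) &&& (-x - 1).toNat = (-x - 1).toNat % 128 := by
      have h1 := Nat.and_two_pow_sub_one_eq_mod ((-x - 1).toNat) 7
      have h2 : (127 : Nat) &&& (-x - 1).toNat = (-x - 1).toNat &&& 127 := Nat.land_comm _ _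
      rw [h2]; simpa using h1
    rw [show ((127 : Int)).toNat = 127 from rfl, h127]
    omega
  · omega

-- band x (2^j) only depends on x mod 128, for j < 7
theorem pv_band_pow_mod (x : Int) (j : Nat) (h : j < 7) :
    PySem.Int.band x ((1 : Int) <<< j) = PySem.Int.band (x % 128) ((1 : Int) <<< j) := by
  have hpow : (1 : Int) <<< j = ((2 ^ j : Nat) : Int) := by
    simp [Int.shiftLeft_eq]
  have hp0 : (0 : Int) ≤ ((2 ^ j : Nat) : Int) := by positivity
  have hm0 : (0 : Int) ≤ x % 128 := Int.emod_nonneg _ (by norm_num)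
  have hmlt : x % 128 < 128 := Int.emod_lt_of_pos _ (by norm_num)
  rw [hpow]
  have hRHS : PySem.Int.band (x % 128) ((2 ^ j : Nat) : Int) = ((((x % 128).toNat &&& 2 ^ j : Nat)) : Int) := by
    rw [PySem.Int.band_of_nonneg hm0 hp0, Int.toNat_natCast]
  by_cases hx : (0 : Int) ≤ x
  · rw [PySem.Int.band_of_nonneg hx hp0, Int.toNat_natCast, hRHS]
    have hxm : (x % 128).toNat = x.toNat % 128 := by omega
    rw [hxm, ← pv_nat_and_pow_mod x.toNat j h]
  · have hL : PySem.Int.band x ((2 ^ j : Nat) : Int) =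
        (((2 ^ j - (2 ^ j &&& (-x - 1).toNat) : Nat)) : Int) := by
      unfold PySem.Int.band
      rw [if_neg hx, if_pos hp0, Int.toNat_natCast]
    rw [hL, hRHS]
    have hy : (x % 128).toNat = 127 - (-x - 1).toNat % 128 := by omega
    rw [hy, ← pv_nat_pow_sub_and (-x - 1).toNat j h]

theorem pv_firstBit_mod (x : Int) (l : List Nat) (hl : ∀ j ∈ l, j < 7) :
    pvFirstBit x l = pvFirstBit (x % 128) l := by
  induction l with
  | nil => rfl
  | cons j js ih =>
    have hj : j < 7 := hl j (List.mem_cons_self ..)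
    simp only [pvFirstBit, pv_band_pow_mod x j hj]
    split_ifs with hc
    · rfl
    · exact ih (fun j' hj' => hl j' (List.mem_cons_of_mem _ hj'))

theorem pv_key : ∀ m : Fin 128,
    pvFirstBit (↑m.val) (List.range 7) =
      PySem.Int.band (PySem.Int.band (↑m.val) 127) (-(PySem.Int.band (↑m.val) 127)) := by decide

theorem pv_elem (x : Int) :
    pvFirstBit x (List.range 7) =
      PySem.Int.band (PySem.Int.band x 127) (-(PySem.Int.band x 127)) := by
  have hm0 : (0 : Int) ≤ x % 128 := Int.emod_nonneg _ (by norm_num)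
  have hmlt : x % 128 < 128 := Int.emod_lt_of_pos _ (by norm_num)
  have hfin : ∃ m : Fin 128, x % 128 = ↑m.val := ⟨⟨(x % 128).toNat, by omega⟩, by simp; omega⟩
  obtain ⟨m, hm⟩ := hfin
  have hmod : (↑m.val : Int) % 128 = ↑m.val := by
    have : m.val < 128 := m.isLt
    omega
  rw [pv_firstBit_mod x _ (by simp), pv_band127 x, hm, pv_key m,
    show PySem.Int.band (↑m.val) 127 = ↑m.val from by rw [pv_band127, hmod]]

-- ===== VERDICT (by name: the statement is the Claim_ definition above) =====
theorem gen_array_spec : Claim_equal_gen_array := by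
  intro A _
  unfold Spec_gen_array gen_array gen_array_alt
  exact List.map_congr_left (fun x _ => pv_elem x)
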